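-- pv_equiv track=rewrite | github.com/redisnotbluedev/humanizer | main.py | smart_batch_sentences
-- ===== SOURCE A (Python) =====
-- def smart_batch_sentences(text, fake_sentences, max_batch_size=4):
-- 	"""Batch sentences that are adjacent in the original text"""
-- 	# Find positions of flagged sentences
-- 	sentence_positions = []
-- 	for sentence in fake_sentences:
-- 		pos = text.find(sentence)
-- 		sentence_positions.append((pos, sentence))
--
-- 	# Sort by position
-- 	sentence_positions.sort()
--
-- 	# Group adjacent sentences
-- 	batches = []
-- 	current_batch = [sentence_positions[0][1]]
--
-- 	for i in range(1, len(sentence_positions)):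
-- 		prev_pos, prev_sent = sentence_positions[i-1]
-- 		curr_pos, curr_sent = sentence_positions[i]
--
-- 		# If sentences are close together (within 200 chars) and batch isn't full
-- 		if curr_pos - (prev_pos + len(prev_sent)) < 200 and len(current_batch) < max_batch_size:
-- 			current_batch.append(curr_sent)
-- 		else:
-- 			batches.append(" ".join(current_batch))
-- 			current_batch = [curr_sent]
--
-- 	batches.append(" ".join(current_batch))
-- 	return batches
-- ===== SOURCE B (Python) =====
-- def smart_batch_sentences(text, fake_sentences, max_batch_size=4):
-- 	"""Batch sentences that are adjacent in the original text.
--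
-- 	Staged decomposition: first split the sorted (position, sentence) pairs
-- 	into proximity groups at every gap >= 200 chars (the batch-size limit
-- 	plays no role in this pass), then slice each group into fixed-size
-- 	chunks of max(max_batch_size, 1) sentences and join each chunk. Inside
-- 	a proximity group the original greedy size limit breaks exactly every
-- 	max_batch_size sentences, so the two stages return the same batches."""
-- 	pairs = sorted((text.find(s), s) for s in fake_sentences)
-- 	size = max(max_batch_size, 1)
--
-- 	# stage 1: proximity groups (gap >= 200 starts a new group)
-- 	groups = []
-- 	for pair in pairs:
-- 		if groups and pair[0] - (groups[-1][-1][0] + len(groups[-1][-1][1])) < 200: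
-- 			groups[-1].append(pair)
-- 		else:
-- 			groups.append([pair])
--
-- 	# stage 2: slice each group into chunks of `size` sentences
-- 	batches = []
-- 	for g in groups:
-- 		while g:
-- 			batches.append(" ".join(s for _, s in g[:size]))
-- 			g = g[size:]
-- 	return batches
-- ===== Notes on version B (the rewrite author's own statement) =====
-- stated objective: alternative
-- what changed: B replaces A's single left-to-right scan with a flushing current-batch accumulator by two independent stages: a recursive (right-fold) split of the sorted pairs into proximity groups at every gap >= 200, then fixed-size slicing of each group into chunks of max(max_batch_size,1); correct because inside a gap-group A's greedy scan breaks exactly when the batch reaches max_batch_size, i.e. it slices the group into fixed-size chunks.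
import Mathlib
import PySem

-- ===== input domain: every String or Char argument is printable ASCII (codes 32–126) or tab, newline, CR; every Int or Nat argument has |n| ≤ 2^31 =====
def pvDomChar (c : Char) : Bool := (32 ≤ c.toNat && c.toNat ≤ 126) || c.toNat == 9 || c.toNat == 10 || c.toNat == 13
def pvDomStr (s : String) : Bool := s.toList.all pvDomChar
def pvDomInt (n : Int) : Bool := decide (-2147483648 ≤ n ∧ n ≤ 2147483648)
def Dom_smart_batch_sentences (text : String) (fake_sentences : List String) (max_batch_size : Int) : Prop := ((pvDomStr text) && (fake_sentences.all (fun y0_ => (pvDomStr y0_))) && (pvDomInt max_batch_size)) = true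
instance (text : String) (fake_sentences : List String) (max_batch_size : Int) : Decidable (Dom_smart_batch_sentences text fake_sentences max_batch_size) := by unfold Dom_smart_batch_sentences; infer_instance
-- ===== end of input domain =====

-- B replaces A's accumulator scan by two stages: a recursive split into proximity groups at gaps >= 200, then fixed-size slicing of each group (same cost; A raises on an empty list, B returns []).


-- ===== PORT A =====
-- the 'for i in range(1, len(sentence_positions))' loop: state = (batches, current_batch), prev/curr are adjacent sorted pairs
def pvLoopA (max_batch_size : Int) : (Int × String) → List (Int × String) → List String → List String → List String
  | _, [], batches, current_batch => batches ++ [PySem.Str.join " " current_batch]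
  | prev, curr :: rest, batches, current_batch =>
    if curr.1 - (prev.1 + PySem.Str.len prev.2) < 200 ∧ (current_batch.length : Int) < max_batch_size then
      pvLoopA max_batch_size curr rest batches (current_batch ++ [curr.2])
    else
      pvLoopA max_batch_size curr rest (batches ++ [PySem.Str.join " " current_batch]) [curr.2]

def smart_batch_sentences (text : String) (fake_sentences : List String) (max_batch_size : Int) : List String :=
  let sentence_positions := fake_sentences.map (fun sentence => (PySem.Str.find text sentence, sentence))
  let sorted := PySem.List.sorted2 sentence_positions Prod.fst Prod.snd
  match sorted with
  | [] => []  -- Python raises IndexError here (sentence_positions[0]); excluded by Pre_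
  | p :: rest => pvLoopA max_batch_size p rest [] [p.2]

-- ===== PORT B =====
-- stage-1 loop body of Source B: append pair to the last group when the gap to its last pair is < 200, else open a new group
def pvGroupStep (groups : List (List (Int × String))) (pair : Int × String) : List (List (Int × String)) :=
  match groups.getLast? with
  | some g =>
    match g.getLast? with
    | some q =>
      if pair.1 - (q.1 + PySem.Str.len q.2) < 200 then groups.dropLast ++ [g ++ [pair]]
      else groups ++ [[pair]]
    | none => groups ++ [[pair]]
  | none => groups ++ [[pair]]

-- stage-2 inner while loop of Source B: join g[:size], continue with g[size:]; size ≥ 1 always, so g[size:] on a cons is g.tail.drop (size-1)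
def pvChunkJoin (s : Nat) : List (Int × String) → List String
  | [] => []
  | x :: g => PySem.Str.join " " (((x :: g).take s).map Prod.snd) :: pvChunkJoin s (g.drop (s - 1))
termination_by l => l.length
decreasing_by
  simp only [List.length_cons, List.length_drop]
  omega

def smart_batch_sentences_alt (text : String) (fake_sentences : List String) (max_batch_size : Int) : List String :=
  let pairs := PySem.List.sorted2 (fake_sentences.map (fun s => (PySem.Str.find text s, s))) Prod.fst Prod.snd
  let size := (max max_batch_size 1).toNat  -- size = max(max_batch_size, 1) ≥ 1, so toNat is exact
  let groups := pairs.foldl pvGroupStep []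
  groups.foldl (fun batches g => batches ++ pvChunkJoin size g) []

-- ===== PRECONDITION & SPEC =====
-- Pre_ excludes exactly the empty fake_sentences list, on which A raises IndexError (sentence_positions[0]).
def Pre_smart_batch_sentences (text : String) (fake_sentences : List String) (max_batch_size : Int) : Prop :=
  fake_sentences ≠ []
instance (text : String) (fake_sentences : List String) (max_batch_size : Int) : Decidable (Pre_smart_batch_sentences text fake_sentences max_batch_size) := by unfold Pre_smart_batch_sentences; infer_instance

def pvWitness_smart_batch_sentences : String × List String × Int := ("ab cd ef", ["ab", "ef"], 2)

def Spec_smart_batch_sentences (text : String) (fake_sentences : List String) (max_batch_size : Int) (out : List String) : Prop := out = smart_batch_sentences_alt text fake_sentences max_batch_size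
instance (text : String) (fake_sentences : List String) (max_batch_size : Int) (out : List String) : Decidable (Spec_smart_batch_sentences text fake_sentences max_batch_size out) := by unfold Spec_smart_batch_sentences; infer_instance

-- ===== CLAIM (what is proved, stated in full; the proofs are below) =====
def Claim_equal_smart_batch_sentences : Prop := ∀ (text : String) (fake_sentences : List String) (max_batch_size : Int), Dom_smart_batch_sentences text fake_sentences max_batch_size → Pre_smart_batch_sentences text fake_sentences max_batch_size → Spec_smart_batch_sentences text fake_sentences max_batch_size (smart_batch_sentences text fake_sentences max_batch_size)


-- ===== LEMMAS AND PROOFS =====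

-- longest prefix of the list chained to prev by gaps < 200, and the remainder
def pvTakeGap : (Int × String) → List (Int × String) → List (Int × String) × List (Int × String)
  | _, [] => ([], [])
  | prev, c :: rest =>
    if c.1 - (prev.1 + PySem.Str.len prev.2) < 200 then
      (c :: (pvTakeGap c rest).1, (pvTakeGap c rest).2)
    else ([], c :: rest)

theorem pvTakeGap_snd_le (l : List (Int × String)) :
    ∀ p, (pvTakeGap p l).2.length ≤ l.length := by
  induction l with
  | nil => intro p; simp [pvTakeGap]
  | cons c rs ih =>
    intro p
    rw [pvTakeGap]
    split
    · exact le_trans (ih c) (by simp)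
    · simp

-- the proximity groups of a sorted list, one maximal gap-run at a time
def pvSplitGroups : List (Int × String) → List (List (Int × String))
  | [] => []
  | p :: rest => (p :: (pvTakeGap p rest).1) :: pvSplitGroups ((pvTakeGap p rest).2)
termination_by l => l.length
decreasing_by
  exact Nat.lt_succ_of_le (pvTakeGap_snd_le rest p)

theorem pvSplitGroups_nil : pvSplitGroups [] = [] := by simp [pvSplitGroups]

theorem pvSplitGroups_cons (p : Int × String) (rest : List (Int × String)) :
    pvSplitGroups (p :: rest) = (p :: (pvTakeGap p rest).1) :: pvSplitGroups ((pvTakeGap p rest).2) := by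
  simp [pvSplitGroups]

-- A's current batch continued through the rest of a group's sentences, flushing at size s
def pvChunkCont (s : Nat) : List String → List String → List (List String)
  | cb, [] => [cb]
  | cb, x :: xs => if cb.length < s then pvChunkCont s (cb ++ [x]) xs else cb :: pvChunkCont s [x] xs

-- chunk shapes of pvChunkJoin, before joining
def pvChunksStr (s : Nat) : List String → List (List String)
  | [] => []
  | x :: g => ((x :: g).take s) :: pvChunksStr s (g.drop (s - 1))
termination_by l => l.length
decreasing_by
  simp only [List.length_cons, List.length_drop]
  omega

theorem pvChunksStr_cons (s : Nat) (x : String) (g : List String) :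
    pvChunksStr s (x :: g) = ((x :: g).take s) :: pvChunksStr s (g.drop (s - 1)) := by
  simp [pvChunksStr]

theorem pvChunkJoin_eq (s : Nat) (g : List (Int × String)) :
    pvChunkJoin s g = (pvChunksStr s (g.map Prod.snd)).map (PySem.Str.join " ") := by
  induction g using pvChunkJoin.induct s with
  | case1 => simp [pvChunkJoin, pvChunksStr]
  | case2 x g ih =>
    rw [pvChunkJoin, ih, List.map_cons, pvChunksStr_cons, List.map_cons]
    simp [List.map_take, List.map_drop]

-- B's whole stage 2 as a function of the sorted list
def pvBtail (m : Int) (l : List (Int × String)) : List String :=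
  (pvSplitGroups l).flatMap (pvChunkJoin ((max m 1).toNat))

-- Source B's stage-1 foldl reaches exactly the pvSplitGroups decomposition
theorem pvFoldGroups (l : List (Int × String)) :
    ∀ (gs : List (List (Int × String))) (g : List (Int × String)) (q : Int × String), g.getLast? = some q →
      l.foldl pvGroupStep (gs ++ [g]) = gs ++ ((g ++ (pvTakeGap q l).1) :: pvSplitGroups ((pvTakeGap q l).2)) := by
  induction l with
  | nil => intro gs g q _; simp [pvTakeGap, pvSplitGroups_nil]
  | cons c cs ih =>
    intro gs g q hq
    rw [List.foldl_cons]
    have hstep : pvGroupStep (gs ++ [g]) c =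
        if c.1 - (q.1 + PySem.Str.len q.2) < 200 then gs ++ [g ++ [c]] else (gs ++ [g]) ++ [[c]] := by
      rw [pvGroupStep, List.getLast?_concat]
      dsimp only
      rw [hq]
      simp [List.dropLast_concat]
    by_cases h : c.1 - (q.1 + PySem.Str.len q.2) < 200
    · rw [hstep, if_pos h, ih gs (g ++ [c]) c (List.getLast?_concat), pvTakeGap, if_pos h]
      simp
    · rw [hstep, if_neg h, ih (gs ++ [g]) [c] c rfl, pvTakeGap, if_neg h]
      dsimp only
      rw [pvSplitGroups_cons]
      simp

theorem pvFoldGroups_nil_init (l : List (Int × String)) :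
    l.foldl pvGroupStep [] = pvSplitGroups l := by
  cases l with
  | nil => simp [pvSplitGroups_nil]
  | cons p rest =>
    rw [List.foldl_cons]
    have h0 : pvGroupStep [] p = [] ++ [[p]] := rfl
    rw [h0, pvFoldGroups rest [] [p] p rfl, pvSplitGroups_cons]
    simp

theorem pvChunkCont_eq (s : Nat) (xs : List String) :
    ∀ cb : List String, 1 ≤ cb.length → cb.length ≤ s →
      pvChunkCont s cb xs = (cb ++ xs.take (s - cb.length)) :: pvChunksStr s (xs.drop (s - cb.length)) := by
  induction xs with
  | nil => intro cb _ _; simp [pvChunkCont, pvChunksStr]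
  | cons x xs ih =>
    intro cb h1 h2
    by_cases h : cb.length < s
    · rw [pvChunkCont, if_pos h, ih (cb ++ [x]) (by simp) (by simp; omega)]
      obtain ⟨k, hk⟩ : ∃ k, s - cb.length = k + 1 := ⟨s - cb.length - 1, by omega⟩
      have hk' : s - (cb ++ [x]).length = k := by simp; omega
      rw [hk, hk', List.take_succ_cons, List.drop_succ_cons]
      simp
    · have hs1 : 1 ≤ s := by omega
      rw [pvChunkCont, if_neg h, ih [x] (by simp) (by simp; omega)]
      have h0 : s - cb.length = 0 := by omega
      rw [h0]
      simp only [List.take_zero, List.drop_zero, List.append_nil]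
      rw [pvChunksStr_cons]
      obtain ⟨k, hk⟩ : ∃ k, s = k + 1 := ⟨s - 1, by omega⟩
      rw [hk, List.take_succ_cons]
      simp

theorem pvChunkCont_single (s : Nat) (hs : 1 ≤ s) (y : String) (xs : List String) :
    pvChunkCont s [y] xs = pvChunksStr s (y :: xs) := by
  rw [pvChunkCont_eq s xs [y] (by simp) (by simpa), pvChunksStr_cons]
  obtain ⟨k, hk⟩ : ∃ k, s = k + 1 := ⟨s - 1, by omega⟩
  rw [hk, List.take_succ_cons]
  simp

theorem pvBtail_cons (m : Int) (q : Int × String) (l : List (Int × String)) :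
    pvBtail m (q :: l) =
      (pvChunkCont ((max m 1).toNat) [q.2] ((pvTakeGap q l).1.map Prod.snd)).map (PySem.Str.join " ") ++
        pvBtail m ((pvTakeGap q l).2) := by
  have hs : 1 ≤ (max m 1).toNat := by
    have h1 : (1 : Int) ≤ max m 1 := le_max_right _ _
    omega
  rw [pvBtail, pvSplitGroups_cons, List.flatMap_cons, pvChunkJoin_eq, List.map_cons,
    ← pvChunkCont_single _ hs]
  rw [pvBtail]

theorem pvSizeIff (m : Int) (k : Nat) (hk : 1 ≤ k) : ((k : Int) < m ↔ k < (max m 1).toNat) := by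
  rcases le_total m 1 with h | h
  · rw [max_eq_right h]; omega
  · rw [max_eq_left h]; omega

theorem pvLoopA_eq (m : Int) (rest : List (Int × String)) :
    ∀ (prev : Int × String) (cb batches : List String), 1 ≤ cb.length → cb.length ≤ (max m 1).toNat →
      pvLoopA m prev rest batches cb =
        batches ++ (pvChunkCont ((max m 1).toNat) cb ((pvTakeGap prev rest).1.map Prod.snd)).map (PySem.Str.join " ")
          ++ pvBtail m ((pvTakeGap prev rest).2) := by
  have hs1 : 1 ≤ (max m 1).toNat := by
    have h1 : (1 : Int) ≤ max m 1 := le_max_right _ _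
    omega
  induction rest with
  | nil =>
    intro prev cb batches _ _
    simp [pvLoopA, pvTakeGap, pvChunkCont, pvBtail, pvSplitGroups_nil]
  | cons curr rs ih =>
    intro prev cb batches h1 h2
    by_cases hgap : curr.1 - (prev.1 + PySem.Str.len prev.2) < 200
    · by_cases hsz : (cb.length : Int) < m
      · have hlt : cb.length < (max m 1).toNat := (pvSizeIff m cb.length h1).mp hsz
        rw [pvLoopA, if_pos ⟨hgap, hsz⟩,
          ih curr (cb ++ [curr.2]) batches (by simp) (by simp; omega),
          pvTakeGap, if_pos hgap]
        dsimp only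
        rw [List.map_cons, pvChunkCont, if_pos hlt]
      · have hlt : ¬ cb.length < (max m 1).toNat := fun hl => hsz ((pvSizeIff m cb.length h1).mpr hl)
        rw [pvLoopA, if_neg (fun hc => hsz hc.2),
          ih curr [curr.2] (batches ++ [PySem.Str.join " " cb]) (by simp) (by simpa using hs1),
          pvTakeGap, if_pos hgap]
        dsimp only
        rw [List.map_cons, pvChunkCont, if_neg hlt]
        simp [List.append_assoc]
    · rw [pvLoopA, if_neg (fun hc => hgap hc.1),
        ih curr [curr.2] (batches ++ [PySem.Str.join " " cb]) (by simp) (by simpa using hs1),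
        pvTakeGap, if_neg hgap]
      dsimp only
      rw [pvBtail_cons]
      simp [pvChunkCont, List.append_assoc]

-- ===== VERDICT (by name: the statement is the Claim_ definition above) =====
theorem smart_batch_sentences_spec : Claim_equal_smart_batch_sentences := by
  intro text fake_sentences max_batch_size _ hpre
  unfold Spec_smart_batch_sentences
  simp only [smart_batch_sentences, smart_batch_sentences_alt]
  cases hs : PySem.List.sorted2 (fake_sentences.map (fun s => (PySem.Str.find text s, s))) Prod.fst Prod.snd with
  | nil =>
    exfalso
    have := PySem.List.sorted2_perm (fake_sentences.map (fun s => (PySem.Str.find text s, s))) Prod.fst Prod.snd false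
    rw [hs] at this
    have := this.length_eq
    simp at this
    exact hpre (by simpa using this.symm)
  | cons p rest =>
    have hs1 : 1 ≤ (max max_batch_size 1).toNat := by
      have h1 : (1 : Int) ≤ max max_batch_size 1 := le_max_right _ _
      omega
    show pvLoopA max_batch_size p rest [] [p.2] =
      ((p :: rest).foldl pvGroupStep []).foldl
        (fun batches g => batches ++ pvChunkJoin ((max max_batch_size 1).toNat) g) []
    rw [pvFoldGroups_nil_init, PySem.List.foldl_append_eq_flatMap]
    show pvLoopA max_batch_size p rest [] [p.2] = pvBtail max_batch_size (p :: rest)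
    rw [pvLoopA_eq max_batch_size rest p [p.2] [] (by simp) hs1, pvBtail_cons]
    simp
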